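-- pv_equiv track=rewrite | github.com/ArtemTolstoguzov/ascii-art | tests/test_on_primiteves.py | cut_top_bottom
-- ===== SOURCE A (Python) =====
-- def cut_top_bottom(ascii):
--     top = 0
--     bottom = 0
--     start = False
--     for i, line in enumerate(ascii):
--         if not start and ' ' in line:
--             top = i
--             start = True
--         if start and ' ' not in line:
--             bottom = i - 1
--     return ascii[top:bottom], top, bottom
-- ===== SOURCE B (Python) =====
-- def cut_top_bottom(ascii):
--     top = 0
--     start = False
--     for i, line in enumerate(ascii):
--         if ' ' in line:
--             top = i
--             start = True
--             break
--     bottom = 0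
--     if start:
--         blanks = [i for i in range(top + 1, len(ascii)) if ' ' not in ascii[i]]
--         if blanks:
--             bottom = blanks[-1] - 1
--     return ascii[top:bottom], top, bottom
-- ===== Notes on version B (the rewrite author's own statement) =====
-- stated objective: simpler
-- what changed: Replaces the single stateful loop carrying (top, bottom, start) with two independent passes: an early-exit scan for the first space-containing line (top), then a comprehension over the indices after it whose last element gives bottom.
import Mathlib
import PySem

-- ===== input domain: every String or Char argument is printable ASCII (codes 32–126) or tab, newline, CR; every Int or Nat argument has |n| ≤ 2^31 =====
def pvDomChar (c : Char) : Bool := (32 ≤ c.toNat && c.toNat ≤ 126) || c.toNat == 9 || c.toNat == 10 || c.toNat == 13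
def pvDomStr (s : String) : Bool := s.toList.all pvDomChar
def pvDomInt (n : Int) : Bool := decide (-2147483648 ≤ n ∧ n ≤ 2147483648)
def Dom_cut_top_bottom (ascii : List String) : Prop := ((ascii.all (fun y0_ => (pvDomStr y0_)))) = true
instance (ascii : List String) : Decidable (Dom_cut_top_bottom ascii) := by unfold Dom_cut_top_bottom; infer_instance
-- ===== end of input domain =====

-- B replaces A's single stateful (top, bottom, start) loop by two independent passes:
-- an early-exit scan for the first space-containing line, then a comprehension over the
-- later indices whose last element gives bottom (objective: simpler decomposition).

-- ===== PORT A =====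
def cutStepA (s : Int × Int × Bool) (p : Int × String) : Int × Int × Bool :=
  let ts := if !s.2.2 && PySem.Str.isIn " " p.2 then (p.1, true) else (s.1, s.2.2)
  let bottom := if ts.2 && !(PySem.Str.isIn " " p.2) then p.1 - 1 else s.2.1
  (ts.1, bottom, ts.2)

def cut_top_bottom (ascii : List String) : List String × Int × Int :=
  let r := (PySem.List.enumerate ascii 0).foldl cutStepA (0, 0, false)
  (PySem.List.slice ascii (some r.1) (some r.2.1), r.1, r.2.1)

-- ===== PORT B =====
-- the early-exit 'for … break' loop of B
def cutFindTop : List (Int × String) → Option Int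
  | [] => none
  | p :: rest => if PySem.Str.isIn " " p.2 then some p.1 else cutFindTop rest

def cut_top_bottom_alt (ascii : List String) : List String × Int × Int :=
  let ts : Int × Bool :=
    match cutFindTop (PySem.List.enumerate ascii 0) with
    | some i => (i, true)
    | none => (0, false)
  let bottom : Int :=
    if ts.2 then
      let blanks := (PySem.List.pyRange (ts.1 + 1) (PySem.List.len ascii) 1).filter
        (fun i => !(PySem.Str.isIn " " (PySem.List.pyGetD ascii i "")))
      match blanks.getLast? with
      | some j => j - 1
      | none => 0
    else 0
  (PySem.List.slice ascii (some ts.1) (some bottom), ts.1, bottom)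

-- ===== PRECONDITION & SPEC =====
def Spec_cut_top_bottom (ascii : List String) (out : List String × Int × Int) : Prop := out = cut_top_bottom_alt ascii
instance (ascii : List String) (out : List String × Int × Int) : Decidable (Spec_cut_top_bottom ascii out) := by unfold Spec_cut_top_bottom; infer_instance

-- ===== CLAIM (what is proved, stated in full; the proofs are below) =====
def Claim_equal_cut_top_bottom : Prop := ∀ (ascii : List String), Dom_cut_top_bottom ascii → Spec_cut_top_bottom ascii (cut_top_bottom ascii)

-- ===== LEMMAS AND PROOFS =====

-- A's loop before any space-line: state unchanged
theorem foldA_nospace (xs : List String) (s t b : Int)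
    (h : ∀ l ∈ xs, PySem.Str.isIn " " l = false) :
    (PySem.List.enumerate xs s).foldl cutStepA (t, b, false) = (t, b, false) := by
  induction xs generalizing s with
  | nil => simp [PySem.List.enumerate_nil]
  | cons x xs ih =>
      have hx : PySem.Str.isIn " " x = false := h x (by simp)
      simp only [] at hx
      rw [PySem.List.enumerate_cons, List.foldl_cons,
        show cutStepA (t, b, false) (s, x) = (t, b, false) by simp [cutStepA]; simp at hx; simp [hx]]
      exact ih (s + 1) (fun l hl => h l (by simp [hl]))

-- bottom accumulator of A's loop once start is true
def cutBot : List (Int × String) → Int → Int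
  | [], b => b
  | p :: rest, b => cutBot rest (if PySem.Str.isIn " " p.2 then b else p.1 - 1)

-- A's loop after start: top and start frozen, bottom follows cutBot
theorem foldA_started (l : List (Int × String)) (t b : Int) :
    l.foldl cutStepA (t, b, true) = (t, cutBot l b, true) := by
  induction l generalizing b with
  | nil => simp [cutBot]
  | cons p rest ih =>
      rw [List.foldl_cons]
      by_cases hp : PySem.Str.isIn " " p.2 = true
      · rw [show cutStepA (t, b, true) p = (t, b, true) by
          simp [cutStepA]; simp at hp; simp [hp], ih]
        simp only [cutBot, hp, if_pos]
      · simp only [Bool.not_eq_true] at hp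
        rw [show cutStepA (t, b, true) p = (t, p.1 - 1, true) by
          simp [cutStepA]; simp at hp; simp [hp], ih]
        simp only [cutBot, hp]
        simp
-- cutBot is "last blank index minus one, else default"
theorem cutBot_eq_getLast (l : List (Int × String)) (b : Int) :
    cutBot l b =
      match ((l.filter (fun q => !(PySem.Str.isIn " " q.2))).map (·.1)).getLast? with
      | some j => j - 1
      | none => b := by
  induction l generalizing b with
  | nil => simp [cutBot]
  | cons p rest ih =>
      by_cases hp : PySem.Str.isIn " " p.2 = true
      · have hp' : PySem.Chars.isIn [' '] p.2.toList = true := by simpa using hp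
        rw [show cutBot (p :: rest) b = cutBot rest b by simp [cutBot, hp'],
          List.filter_cons_of_neg (by simp [hp']), ih]
      · simp only [Bool.not_eq_true] at hp
        have hp' : PySem.Chars.isIn [' '] p.2.toList = false := by simpa using hp
        rw [show cutBot (p :: rest) b = cutBot rest (p.1 - 1) by simp [cutBot, hp'],
          List.filter_cons_of_pos (by simp [hp']), List.map_cons, ih]
        rcases h : ((rest.filter (fun q => !(PySem.Str.isIn " " q.2))).map (·.1)).getLast? with _ | j
        · rw [List.getLast?_eq_none_iff.mp h]
          rfl
        · obtain ⟨ys, hys⟩ := (List.getLast?_eq_some_iff).mp h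
          have h2 : (p.1 :: (ys ++ [j])).getLast? = some j := by
            rw [← List.cons_append, List.getLast?_concat]
          rw [hys, List.getLast?_concat, h2]

-- B's index comprehension over k..len(full), with full.drop k = d, equals the
-- filtered first components of (enumerate d k)
theorem filter_pyRange_eq (full : List String) (d : List String) (k : Nat)
    (hd : full.drop k = d) (hk : k ≤ full.length) :
    ((PySem.List.pyRange (k : Int) (full.length : Int) 1).filter
        (fun i => !(PySem.Str.isIn " " (PySem.List.pyGetD full i "")))) =
      ((PySem.List.enumerate d (k : Int)).filter
        (fun q => !(PySem.Str.isIn " " q.2))).map (·.1) := by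
  induction d generalizing k with
  | nil =>
      have : k = full.length := by
        have := congrArg List.length hd; simp at this; omega
      subst this
      rw [PySem.List.pyRange_one_eq_nil (le_refl _)]
      simp [PySem.List.enumerate_nil]
  | cons x xs ih =>
      have hlen : k < full.length := by
        have := congrArg List.length hd; simp at this; omega
      have hget : full[k] = x := by
        have : (full.drop k)[0]'(by rw [hd]; simp) = x := by simp [hd]
        simpa [List.getElem_drop] using this
      have hcons : PySem.List.pyRange (k : Int) (full.length : Int) 1 =
          (k : Int) :: PySem.List.pyRange ((k : Int) + 1) (full.length : Int) 1 :=
        PySem.List.pyRange_one_cons (by exact_mod_cast hlen)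
      have hgd : PySem.List.pyGetD full (k : Int) "" = x := by
        rw [PySem.List.pyGetD_natCast]; simp [hlen, hget]
      have hd' : full.drop (k + 1) = xs := by
        have := congrArg List.tail hd; simpa [List.tail_drop] using this
      rw [hcons, PySem.List.enumerate_cons, List.filter_cons, List.filter_cons]
      have hrec := ih (k + 1) hd' (by omega)
      push_cast at hrec
      by_cases hx : PySem.Str.isIn " " x = true
      · simp only [hgd, hx, Bool.not_true, Bool.false_eq_true, if_false]
        exact hrec
      · have hxf : PySem.Str.isIn " " x = false := by simpa using hx
        simp only [hgd, hxf, Bool.not_false, if_true, List.map_cons]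
        rw [hrec]

-- cutFindTop skips a space-free enumerated prefix
theorem cutFindTop_append_nospace (xs : List String) (s : Int) (l : List (Int × String))
    (h : ∀ x ∈ xs, PySem.Str.isIn " " x = false) :
    cutFindTop (PySem.List.enumerate xs s ++ l) = cutFindTop l := by
  induction xs generalizing s with
  | nil => simp [PySem.List.enumerate_nil]
  | cons x xs ih =>
      have hx : PySem.Chars.isIn [' '] x.toList = false := by simpa using h x (by simp)
      rw [PySem.List.enumerate_cons, List.cons_append,
        show cutFindTop ((s, x) :: (PySem.List.enumerate xs (s + 1) ++ l)) =
          cutFindTop (PySem.List.enumerate xs (s + 1) ++ l) by simp [cutFindTop, hx]]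
      exact ih (s + 1) (fun y hy => h y (by simp [hy]))

-- head of a dropWhile remainder fails the predicate
theorem dropWhile_head_false (p : String → Bool) (l : List String) (x : String)
    (xs : List String) (h : l.dropWhile p = x :: xs) : p x = false := by
  have hne : l.dropWhile p ≠ [] := by rw [h]; simp
  have := List.head_dropWhile_not p (l := l) hne
  have hx : (l.dropWhile p).head hne = x := by simp [h]
  rw [hx] at this; simpa using this

-- ===== VERDICT (by name: the statement is the Claim_ definition above) =====
theorem cut_top_bottom_spec : Claim_equal_cut_top_bottom := by
  intro ascii _
  unfold Spec_cut_top_bottom cut_top_bottom cut_top_bottom_alt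
  have hsplit : ascii = ascii.takeWhile (fun l => !(PySem.Str.isIn " " l)) ++
      ascii.dropWhile (fun l => !(PySem.Str.isIn " " l)) :=
    (List.takeWhile_append_dropWhile).symm
  have hpreNo : ∀ x ∈ ascii.takeWhile (fun l => !(PySem.Str.isIn " " l)),
      PySem.Str.isIn " " x = false := by
    intro x hx
    have := List.mem_takeWhile_imp hx
    simpa using this
  cases hr : ascii.dropWhile (fun l => !(PySem.Str.isIn " " l)) with
  | nil =>
      have hall : ∀ l ∈ ascii, PySem.Str.isIn " " l = false := by
        intro l hl
        rw [hsplit, hr] at hl; simp at hl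
        exact hpreNo l hl
      rw [show (PySem.List.enumerate ascii 0).foldl cutStepA (0, 0, false) = (0, 0, false) from
        foldA_nospace ascii 0 0 0 hall]
      have hft : cutFindTop (PySem.List.enumerate ascii 0) = none := by
        rw [show PySem.List.enumerate ascii 0 = PySem.List.enumerate ascii 0 ++ [] by simp,
          cutFindTop_append_nospace ascii 0 [] hall]
        rfl
      simp [hft]
  | cons hline tl =>
      have hhead : PySem.Chars.isIn [' '] hline.toList = true := by
        by_contra hc
        have := dropWhile_head_false (fun l => !(PySem.Str.isIn " " l)) ascii hline tl hr
        simp at this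
        exact hc (by simpa using this)
      set pre := ascii.takeWhile (fun l => !(PySem.Str.isIn " " l)) with hpre
      have henum : PySem.List.enumerate ascii 0 =
          PySem.List.enumerate pre 0 ++ PySem.List.enumerate (hline :: tl) (0 + pre.length) := by
        rw [hsplit, hr, PySem.List.enumerate_append]
      have hfoldA : (PySem.List.enumerate ascii 0).foldl cutStepA (0, 0, false) =
          ((pre.length : Int), cutBot (PySem.List.enumerate tl ((pre.length : Int) + 1)) 0, true) := by
        rw [henum, List.foldl_append, foldA_nospace pre 0 0 0 hpreNo,
          PySem.List.enumerate_cons, List.foldl_cons,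
          show cutStepA (0, 0, false) ((0 : Int) + (pre.length : Int), hline) =
            ((pre.length : Int), 0, true) by simp [cutStepA, hhead],
          foldA_started]
        norm_num
      have hft : cutFindTop (PySem.List.enumerate ascii 0) = some (pre.length : Int) := by
        rw [henum, cutFindTop_append_nospace pre 0 _ hpreNo, PySem.List.enumerate_cons]
        simp [cutFindTop, hhead]
      have hdrop : ascii.drop (pre.length + 1) = tl := by
        conv_lhs => rw [hsplit, hr]
        simpa using List.drop_append (l₁ := pre) (l₂ := hline :: tl) (i := 1)
      have hlen2 : pre.length + 1 ≤ ascii.length := by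
        conv_rhs => rw [hsplit, hr]
        simp
      have hblanks := filter_pyRange_eq ascii tl (pre.length + 1) hdrop hlen2
      push_cast at hblanks
      rw [hfoldA, hft]
      simp only [PySem.List.len, if_pos]
      rw [hblanks, ← cutBot_eq_getLast]
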